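-- pv_equiv track=rewrite | github.com/timowlmtn/azrius-core | python/src/core/CommandParser.py | extract_parenthesized_clauses
-- ===== SOURCE A (Python) =====
-- def extract_parenthesized_clauses(input_string):
--     result = []
--     buffer = []
--     start_index = 0
--     for i, char in enumerate(input_string):
--         if char == "(":
--             buffer = []
--             start_index = i
--         elif char == ")":
--             clause = "".join(buffer)
--             result.append((clause, start_index, i + 1))
--             buffer = []
--         else:
--             buffer.append(char)
--
--     return result
-- ===== SOURCE B (Python) =====
-- def extract_parenthesized_clauses(input_string):
--     parens = [(i, c) for i, c in enumerate(input_string) if c in "()"]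
--     result = []
--     start_index = 0
--     seg_start = 0
--     for i, c in parens:
--         if c == "(":
--             start_index = i
--         else:
--             result.append((input_string[seg_start:i], start_index, i + 1))
--         seg_start = i + 1
--     return result
-- ===== Notes on version B (the rewrite author's own statement) =====
-- stated objective: alternative
-- what changed: B first filters the enumerated string down to the list of parenthesis events (index, char) and then loops only over those events, slicing the original string between consecutive events, instead of A's single per-character loop that accumulates a character buffer and joins it.
import Mathlib
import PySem

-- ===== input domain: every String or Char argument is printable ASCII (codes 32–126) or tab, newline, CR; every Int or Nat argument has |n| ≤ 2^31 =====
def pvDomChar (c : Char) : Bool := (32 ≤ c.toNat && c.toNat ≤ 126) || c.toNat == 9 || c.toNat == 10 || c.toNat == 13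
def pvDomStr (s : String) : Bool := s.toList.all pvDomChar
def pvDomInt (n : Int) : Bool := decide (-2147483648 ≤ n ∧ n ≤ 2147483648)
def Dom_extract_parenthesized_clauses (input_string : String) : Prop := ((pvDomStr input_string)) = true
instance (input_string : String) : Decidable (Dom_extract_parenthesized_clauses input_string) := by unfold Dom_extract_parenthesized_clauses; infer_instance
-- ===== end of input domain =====

-- B extracts the (index, char) list of parenthesis events first and loops only over those
-- events, slicing the original string between consecutive events (objective: alternative —
-- no per-character buffer accumulation or join).

-- ===== PORT A =====
-- literal port of A's per-character loop: state = (result, buffer, start_index)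
def pvAGo : List Char → Nat → List (String × Int × Int) → List Char → Nat → List (String × Int × Int)
  | [], _, res, _, _ => res
  | c :: cs, i, res, buf, start =>
    if c = '(' then pvAGo cs (i + 1) res [] i
    else if c = ')' then
      pvAGo cs (i + 1) (res ++ [(String.ofList buf, (start : Int), (i : Int) + 1)]) [] start
    else pvAGo cs (i + 1) res (buf ++ [c]) start

def extract_parenthesized_clauses (input_string : String) : List (String × Int × Int) :=
  pvAGo input_string.toList 0 [] [] 0

-- ===== PORT B =====
-- literal port of B's event loop: state = (result, start_index, seg_start); both branches
-- fall through to seg_start := i + 1, as in Source B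
def pvBGo (s : List Char) : List (Int × Char) → List (String × Int × Int) → Int → Int → List (String × Int × Int)
  | [], res, _, _ => res
  | (i, c) :: es, res, start, seg =>
    if c = '(' then pvBGo s es res i (i + 1)
    else pvBGo s es
      (res ++ [(String.ofList (PySem.List.slice s (some seg) (some i)), start, i + 1)])
      start (i + 1)

def extract_parenthesized_clauses_alt (input_string : String) : List (String × Int × Int) :=
  pvBGo input_string.toList
    ((PySem.List.enumerate input_string.toList 0).filter (fun p => p.2 == '(' || p.2 == ')'))
    [] 0 0

-- ===== PRECONDITION & SPEC =====
def Spec_extract_parenthesized_clauses (input_string : String) (out : List (String × Int × Int)) : Prop := out = extract_parenthesized_clauses_alt input_string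
instance (input_string : String) (out : List (String × Int × Int)) : Decidable (Spec_extract_parenthesized_clauses input_string out) := by unfold Spec_extract_parenthesized_clauses; infer_instance

-- ===== CLAIM (what is proved, stated in full; the proofs are below) =====
def Claim_equal_extract_parenthesized_clauses : Prop := ∀ (input_string : String), Dom_extract_parenthesized_clauses input_string → Spec_extract_parenthesized_clauses input_string (extract_parenthesized_clauses input_string)

-- ===== LEMMAS AND PROOFS =====

-- invariant: A's buffer equals the s[seg:i] slice B would take, and B's remaining event
-- list is the filtered enumeration of A's remaining characters
theorem pvGo_eq (s : List Char) :
    ∀ (cs : List Char) (i : Nat) (res : List (String × Int × Int)) (buf : List Char)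
      (seg start : Nat), s.drop i = cs → seg ≤ i → buf = (s.drop seg).take (i - seg) →
      pvAGo cs i res buf start =
        pvBGo s ((PySem.List.enumerate cs (i : Int)).filter (fun p => p.2 == '(' || p.2 == ')'))
          res (start : Int) (seg : Int) := by
  intro cs
  induction cs with
  | nil => intro i res buf seg start _ _ _; simp [pvAGo, pvBGo, PySem.List.enumerate_nil]
  | cons c cs ih =>
    intro i res buf seg start hdrop hle hbuf
    have hget : s[i]? = some c := by
      rw [← Nat.add_zero i, ← List.getElem?_drop, hdrop]
      rfl
    have hdrop' : s.drop (i + 1) = cs := by simp [← List.drop_drop, hdrop]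
    rw [PySem.List.enumerate_cons]
    by_cases h1 : c = '('
    · -- '(' : event consumed, start := i, seg := i+1
      subst h1
      rw [List.filter_cons_of_pos (by simp)]
      simp only [pvAGo, pvBGo]
      rw [ih (i + 1) res [] (i + 1) i hdrop' (Nat.le_refl _) (by simp)]
      push_cast
      rfl
    · by_cases h2 : c = ')'
      · -- ')' : event consumed, clause emitted, seg := i+1
        subst h2
        rw [List.filter_cons_of_pos (by simp)]
        simp only [pvAGo, if_neg h1, pvBGo]
        rw [PySem.List.slice_natCast, ← hbuf]
        rw [ih (i + 1) (res ++ [(String.ofList buf, (start : Int), (i : Int) + 1)]) [] (i + 1) start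
              hdrop' (Nat.le_refl _) (by simp)]
        push_cast
        rfl
      · -- other char: event filtered out; buffer window extends by c
        rw [List.filter_cons_of_neg (by simp [h1, h2])]
        simp only [pvAGo, if_neg h1, if_neg h2]
        apply ih _ _ _ _ _ hdrop' (by omega)
        have h3 : i + 1 - seg = (i - seg) + 1 := by omega
        rw [h3, List.take_add_one, ← hbuf]
        have h4 : (s.drop seg)[i - seg]? = some c := by
          rw [List.getElem?_drop]
          have : seg + (i - seg) = i := by omega
          rw [this, hget]
        simp [h4]

-- ===== VERDICT (by name: the statement is the Claim_ definition above) =====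
theorem extract_parenthesized_clauses_spec : Claim_equal_extract_parenthesized_clauses := by
  intro s _
  unfold Spec_extract_parenthesized_clauses extract_parenthesized_clauses extract_parenthesized_clauses_alt
  exact pvGo_eq s.toList s.toList 0 [] [] 0 0 rfl (Nat.le_refl 0) rfl
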